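-- pv_equiv track=rewrite | github.com/yiming2333/pyrowl | workflow.py | _file_conflicts
-- ===== SOURCE A (Python) =====
-- def _file_conflicts(files_a, files_b):
--     """检查两个步骤是否有文件冲突（一个读一个写同一文件）"""
--     for fa in files_a:
--         for fb in files_b:
--             # 完全相同
--             if fa == fb:
--                 return True
--             # 一个是另一个的前缀（如 "src" vs "src/a.py"）
--             if fa.startswith(fb.rsplit('.', 1)[0]) or fb.startswith(fa.rsplit('.', 1)[0]):
--                 return True
--     return False
-- ===== SOURCE B (Python) =====
-- def _file_conflicts(files_a, files_b):
--     def stem(p):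
--         return p.rsplit('.', 1)[0]
--     # A pair conflicts iff some stem of one side is a prefix of a path of the
--     # other side (equality is subsumed: stem(p) is always a prefix of p).
--     stems_b = {stem(fb) for fb in files_b}
--     for fa in files_a:
--         for i in range(len(fa) + 1):
--             if fa[:i] in stems_b:
--                 return True
--     stems_a = {stem(fa) for fa in files_a}
--     for fb in files_b:
--         for i in range(len(fb) + 1):
--             if fb[:i] in stems_a:
--                 return True
--     return False
-- ===== Notes on version B (the rewrite author's own statement) =====
-- stated objective: alternative
-- what changed: Replaces A's all-pairs nested scan (each pair re-splitting and prefix-testing) by building, once per side, a hash set of the stripped stems and testing each path's prefixes for membership in the other side's stem set, removing the n*m pairwise loop.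
import Mathlib
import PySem

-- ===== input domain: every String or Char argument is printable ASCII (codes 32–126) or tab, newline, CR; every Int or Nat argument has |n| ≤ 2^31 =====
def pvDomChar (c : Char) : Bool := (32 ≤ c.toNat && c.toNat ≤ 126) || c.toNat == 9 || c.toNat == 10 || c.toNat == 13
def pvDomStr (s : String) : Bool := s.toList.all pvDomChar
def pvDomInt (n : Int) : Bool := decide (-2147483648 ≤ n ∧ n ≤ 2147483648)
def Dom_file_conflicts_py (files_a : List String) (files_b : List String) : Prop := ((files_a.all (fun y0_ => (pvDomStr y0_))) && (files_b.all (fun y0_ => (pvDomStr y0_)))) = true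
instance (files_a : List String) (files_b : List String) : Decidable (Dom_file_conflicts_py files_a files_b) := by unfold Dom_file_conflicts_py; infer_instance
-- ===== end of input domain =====

-- B replaces A's all-pairs nested scan by one set of stripped stems per side and a walk
-- over each path's prefixes (objective: alternative — the n×m pairwise loop disappears).
-- p.rsplit('.', 1)[0]: everything before the LAST '.', or p itself if there is none.
-- Ported by hand via rfind (exact: rsplit with maxsplit=1 splits at the last '.').
def pyStem (s : String) : List Char :=
  if PySem.Chars.rfind s.toList ['.'] = -1 then s.toList
  else s.toList.take (PySem.Chars.rfind s.toList ['.']).toNat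

-- ===== PORT A =====
-- inner 'for fb in files_b' loop with early return True
def fcInnerA (fa : String) (fbs : List String) : Bool :=
  match fbs with
  | [] => false
  | fb :: rest =>
    if fa == fb then true
    else if PySem.Chars.startswith fa.toList (pyStem fb)
         || PySem.Chars.startswith fb.toList (pyStem fa) then true
    else fcInnerA fa rest

def file_conflicts_py (files_a : List String) (files_b : List String) : Bool :=
  match files_a with
  | [] => false
  | fa :: rest => if fcInnerA fa files_b then true else file_conflicts_py rest files_b

-- ===== PORT B =====
-- 'for i in range(len(s)+1): if s[:i] in stems: return True'
def prefixHitB (s : List Char) (stems : PySem.Set (List Char)) : Bool :=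
  (List.range (s.length + 1)).any (fun i => PySem.Set.contains stems (s.take i))

def file_conflicts_py_alt (files_a : List String) (files_b : List String) : Bool :=
  let stems_b : PySem.Set (List Char) := PySem.Set.ofList (files_b.map pyStem)
  if files_a.any (fun fa => prefixHitB fa.toList stems_b) then true
  else
    let stems_a : PySem.Set (List Char) := PySem.Set.ofList (files_a.map pyStem)
    files_b.any (fun fb => prefixHitB fb.toList stems_a)

-- ===== PRECONDITION & SPEC =====
def Spec_file_conflicts_py (files_a : List String) (files_b : List String) (out : Bool) : Prop := out = file_conflicts_py_alt files_a files_b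
instance (files_a : List String) (files_b : List String) (out : Bool) : Decidable (Spec_file_conflicts_py files_a files_b out) := by unfold Spec_file_conflicts_py; infer_instance

-- ===== CLAIM (what is proved, stated in full; the proofs are below) =====
def Claim_equal_file_conflicts_py : Prop := ∀ (files_a : List String) (files_b : List String), Dom_file_conflicts_py files_a files_b → Spec_file_conflicts_py files_a files_b (file_conflicts_py files_a files_b)

-- ===== LEMMAS AND PROOFS =====

theorem pyStem_prefix (s : String) : pyStem s <+: s.toList := by
  unfold pyStem
  split
  · exact List.prefix_refl _
  · exact List.take_prefix _ _

theorem prefixHitB_iff (s : List Char) (stems : List (List Char)) :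
    prefixHitB s stems = true ↔ ∃ t ∈ stems, t <+: s := by
  unfold prefixHitB
  simp only [List.any_eq_true, List.mem_range, PySem.Set.contains_eq_listContains,
    List.contains_iff_mem]
  constructor
  · rintro ⟨i, _, h⟩
    exact ⟨s.take i, h, List.take_prefix _ _⟩
  · rintro ⟨t, ht, hp⟩
    refine ⟨t.length, ?_, ?_⟩
    · have := hp.length_le; omega
    · rwa [← List.prefix_iff_eq_take.mp hp]

theorem fcInnerA_iff (fa : String) (fbs : List String) :
    fcInnerA fa fbs = true ↔
      ∃ fb ∈ fbs, (pyStem fb <+: fa.toList ∨ pyStem fa <+: fb.toList) := by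
  induction fbs with
  | nil => simp [fcInnerA]
  | cons fb rest ih =>
    unfold fcInnerA
    by_cases heq : fa = fb
    · subst heq
      simp only [beq_self_eq_true, if_true, true_iff]
      exact ⟨fa, List.mem_cons_self, Or.inl (pyStem_prefix fa)⟩
    · rw [if_neg (by simpa using heq)]
      cases hsw : (PySem.Chars.startswith fa.toList (pyStem fb)
            || PySem.Chars.startswith fb.toList (pyStem fa)) with
      | true =>
        rw [if_pos rfl]
        refine iff_of_true rfl ?_
        rcases Bool.or_eq_true_iff.mp hsw with h | h
        · exact ⟨fb, List.mem_cons_self, Or.inl ((PySem.Chars.startswith_iff _ _).mp h)⟩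
        · exact ⟨fb, List.mem_cons_self, Or.inr ((PySem.Chars.startswith_iff _ _).mp h)⟩
      | false =>
        rw [if_neg (by simp), ih]
        constructor
        · rintro ⟨x, hx, h⟩; exact ⟨x, List.mem_cons_of_mem _ hx, h⟩
        · rintro ⟨x, hx, h⟩
          rcases List.mem_cons.mp hx with rfl | hx'
          · exfalso
            rcases Bool.or_eq_false_iff.mp hsw with ⟨h1, h2⟩
            rcases h with h | h
            · exact absurd ((PySem.Chars.startswith_iff _ _).mpr h) (by simp [h1])
            · exact absurd ((PySem.Chars.startswith_iff _ _).mpr h) (by simp [h2])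
          · exact ⟨x, hx', h⟩

theorem file_conflicts_py_iff (files_a files_b : List String) :
    file_conflicts_py files_a files_b = true ↔
      ∃ fa ∈ files_a, ∃ fb ∈ files_b,
        (pyStem fb <+: fa.toList ∨ pyStem fa <+: fb.toList) := by
  induction files_a with
  | nil => simp [file_conflicts_py]
  | cons fa rest ih =>
    unfold file_conflicts_py
    by_cases h : fcInnerA fa files_b = true
    · rw [if_pos h]
      simp only [true_iff]
      exact ⟨fa, List.mem_cons_self, (fcInnerA_iff fa files_b).mp h⟩
    · rw [if_neg h, ih]
      constructor
      · rintro ⟨x, hx, hr⟩; exact ⟨x, List.mem_cons_of_mem _ hx, hr⟩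
      · rintro ⟨x, hx, hr⟩
        rcases List.mem_cons.mp hx with rfl | hx'
        · exact absurd ((fcInnerA_iff x files_b).mpr hr) h
        · exact ⟨x, hx', hr⟩

theorem file_conflicts_py_alt_iff (files_a files_b : List String) :
    file_conflicts_py_alt files_a files_b = true ↔
      ∃ fa ∈ files_a, ∃ fb ∈ files_b,
        (pyStem fb <+: fa.toList ∨ pyStem fa <+: fb.toList) := by
  unfold file_conflicts_py_alt
  have hmem : ∀ (l : List String) (t : List Char),
      t ∈ PySem.Set.ofList (l.map pyStem) ↔ ∃ x ∈ l, pyStem x = t := by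
    intro l t
    rw [PySem.Set.mem_ofList]
    simp [List.mem_map]
  by_cases h1 : files_a.any
      (fun fa => prefixHitB fa.toList (PySem.Set.ofList (files_b.map pyStem))) = true
  · rw [if_pos h1]
    simp only [true_iff]
    rcases List.any_eq_true.mp h1 with ⟨fa, hfa, hhit⟩
    rcases (prefixHitB_iff _ _).mp hhit with ⟨t, ht, hp⟩
    rcases (hmem _ _).mp ht with ⟨fb, hfb, rfl⟩
    exact ⟨fa, hfa, fb, hfb, Or.inl hp⟩
  · rw [if_neg h1]
    constructor
    · intro h2
      rcases List.any_eq_true.mp h2 with ⟨fb, hfb, hhit⟩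
      rcases (prefixHitB_iff _ _).mp hhit with ⟨t, ht, hp⟩
      rcases (hmem _ _).mp ht with ⟨fa, hfa, rfl⟩
      exact ⟨fa, hfa, fb, hfb, Or.inr hp⟩
    · rintro ⟨fa, hfa, fb, hfb, hor⟩
      rcases hor with hp | hp
      · exact absurd (List.any_eq_true.mpr ⟨fa, hfa,
          (prefixHitB_iff _ _).mpr ⟨pyStem fb, (hmem _ _).mpr ⟨fb, hfb, rfl⟩, hp⟩⟩) h1
      · exact List.any_eq_true.mpr ⟨fb, hfb,
          (prefixHitB_iff _ _).mpr ⟨pyStem fa, (hmem _ _).mpr ⟨fa, hfa, rfl⟩, hp⟩⟩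

-- ===== VERDICT (by name: the statement is the Claim_ definition above) =====
theorem file_conflicts_py_spec : Claim_equal_file_conflicts_py := by
  intro files_a files_b _
  unfold Spec_file_conflicts_py
  rw [Bool.eq_iff_iff, file_conflicts_py_iff, file_conflicts_py_alt_iff]
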